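-- pv_equiv track=rewrite | github.com/Akuearias/LeetCode | roadsAndLibraries.py | roadsAndLibraries
-- ===== SOURCE A (Python) =====
-- from collections import defaultdict, deque
--
-- def roadsAndLibraries(n, c_lib, c_road, cities):
--     if c_road >= c_lib:
--         return n * c_lib
--
--     adj = defaultdict(list)
--     for u, v in cities:
--         adj[u].append(v)
--         adj[v].append(u)
--
--     visited = [False] * (n + 1)
--     total_cost = 0
--
--     def bfs(start):
--         q = deque([start])
--         visited[start] = True
--         count = 1
--         while q:
--             node = q.popleft()
--             for neighbor in adj[node]:
--                 if not visited[neighbor]: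
--                     visited[neighbor] = True
--                     q.append(neighbor)
--                     count += 1
--         return count
--
--     for city in range(1, n + 1):
--         if not visited[city]:
--             component_size = bfs(city)
--             total_cost += c_lib + (component_size - 1) * c_road
--
--     return total_cost
-- ===== SOURCE B (Python) =====
-- def roadsAndLibraries(n, c_lib, c_road, cities):
--     if c_road >= c_lib:
--         return n * c_lib
--     parent = list(range(n + 1))
--
--     def find(x):
--         while parent[x] != x:
--             x = parent[x]
--         return x
--
--     for u, v in cities:
--         ru, rv = find(u), find(v)
--         if ru != rv:
--             if ru < rv:
--                 parent[rv] = ru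
--             else:
--                 parent[ru] = rv
--     components = sum(1 for i in range(1, n + 1) if parent[i] == i)
--     return components * c_lib + (n - components) * c_road
-- ===== Notes on version B (the rewrite author's own statement) =====
-- stated objective: alternative
-- what changed: Replaced the adjacency-dict + per-vertex BFS (summing c_lib + (size-1)*c_road per component) by a union-find over edges with union-by-minimum-root and a closed-form cost components*c_lib + (n-components)*c_road.
-- outside the precondition, e.g. on roadsAndLibraries(-2, 5, 1, []): A returns 0, B returns -2; on roadsAndLibraries(3, 5, 1, [[1, -2], [2, 3]]): A returns 11, B returns 7
import Mathlib
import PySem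

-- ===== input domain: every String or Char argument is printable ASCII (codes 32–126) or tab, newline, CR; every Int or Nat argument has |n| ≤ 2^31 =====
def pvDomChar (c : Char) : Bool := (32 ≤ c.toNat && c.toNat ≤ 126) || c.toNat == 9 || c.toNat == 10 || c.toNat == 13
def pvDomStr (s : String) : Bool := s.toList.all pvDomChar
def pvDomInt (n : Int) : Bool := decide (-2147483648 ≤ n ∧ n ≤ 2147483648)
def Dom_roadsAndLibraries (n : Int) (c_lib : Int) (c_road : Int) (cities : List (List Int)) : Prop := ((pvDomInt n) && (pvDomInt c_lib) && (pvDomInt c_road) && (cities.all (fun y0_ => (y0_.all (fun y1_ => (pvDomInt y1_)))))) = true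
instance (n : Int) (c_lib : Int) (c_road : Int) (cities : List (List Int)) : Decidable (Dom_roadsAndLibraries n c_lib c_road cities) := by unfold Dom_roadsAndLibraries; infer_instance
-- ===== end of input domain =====

-- B replaces A's adjacency-dict + per-vertex BFS cost sum by a union-find over the edge list
-- (union by minimum root) and the closed form components*c_lib + (n-components)*c_road; same values on Pre_.

-- ===== PORT A =====

-- adj[u].append(v); adj[v].append(u)  (defaultdict(list)); a row that is not a pair raises ValueError in Python (outside Pre_)
def pvAdjStep (d : PySem.Dict Int (List Int)) (e : List Int) : PySem.Dict Int (List Int) :=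
  match e with
  | [u, v] => (d.modify u [] (· ++ [v])).modify v [] (· ++ [u])
  | _ => d

-- the inner 'for neighbor in adj[node]' loop of bfs: mark unvisited neighbours, enqueue them, bump count
def pvScan (adj : PySem.Dict Int (List Int)) (nbrs : List Int) (q : List Int)
    (vis : List Bool) (cnt : Int) : List Int × List Bool × Int :=
  match nbrs with
  | [] => (q, vis, cnt)
  | nb :: rest =>
    if PySem.List.pyGet? vis nb = some false then
      pvScan adj rest (q ++ [nb]) (PySem.List.pySetD vis nb true) (cnt + 1)
    else
      pvScan adj rest q vis cnt   -- already visited, or IndexError in Python (outside Pre_)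

theorem pv_set_count (vis : List Bool) (i : Int)
    (h : PySem.List.pyGet? vis i = some false) :
    (PySem.List.pySetD vis i true).count false + 1 = vis.count false ∧
    (PySem.List.pySetD vis i true).length = vis.length := by
  simp only [PySem.List.pyGet?, Option.bind_eq_some_iff] at h
  obtain ⟨k, hk, hget⟩ := h
  have hlt : k < vis.length := by
    by_contra hh
    simp [List.getElem?_eq_none (by omega : vis.length ≤ k)] at hget
  have hvk : vis[k] = false := by
    simpa [List.getElem?_eq_getElem hlt] using hget
  have hset : PySem.List.pySetD vis i true = vis.set k true := by
    simp [PySem.List.pySetD, PySem.List.pySet?, hk]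
  have hcount := List.count_set (a := true) (b := false) (l := vis) hlt
  have hpos : 0 < vis.count false := by
    have : false ∈ vis := by
      have := List.getElem_mem (l := vis) (n := k) hlt
      rwa [hvk] at this
    exact List.count_pos_iff.mpr this
  constructor
  · rw [hset, hcount]; simp [hvk]; omega
  · rw [hset]; simp

theorem pvScan_measure (adj : PySem.Dict Int (List Int)) (nbrs : List Int) : ∀ (q : List Int)
    (vis : List Bool) (cnt : Int),
    2 * (pvScan adj nbrs q vis cnt).2.1.count false + (pvScan adj nbrs q vis cnt).1.length
      ≤ 2 * vis.count false + q.length := by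
  induction nbrs with
  | nil => intro q vis cnt; simp [pvScan]
  | cons nb rest ih =>
    intro q vis cnt
    rw [pvScan]
    split_ifs with h
    · have hc := (pv_set_count vis nb h).1
      have hih := ih (q ++ [nb]) (PySem.List.pySetD vis nb true) (cnt + 1)
      simp only [List.length_append, List.length_cons, List.length_nil] at hih ⊢
      omega
    · exact ih q vis cnt

-- the 'while q:' loop of bfs
def pvBfs (adj : PySem.Dict Int (List Int)) (q : List Int) (vis : List Bool) (cnt : Int) :
    List Bool × Int :=
  match q with
  | [] => (vis, cnt)
  | node :: rest =>
    let s := pvScan adj (adj.getD node []) rest vis cnt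
    pvBfs adj s.1 s.2.1 s.2.2
termination_by 2 * vis.count false + q.length
decreasing_by
  have h := pvScan_measure adj (adj.getD node []) rest vis cnt
  simp only [List.length_cons]
  omega

def roadsAndLibraries (n : Int) (c_lib : Int) (c_road : Int) (cities : List (List Int)) : Int :=
  if c_lib ≤ c_road then n * c_lib
  else
    let adj := cities.foldl pvAdjStep PySem.Dict.empty
    let init : List Bool := List.replicate (n + 1).toNat false
    let res := (PySem.List.pyRange 1 (n + 1) 1).foldl
      (fun (st : List Bool × Int) city =>
        if PySem.List.pyGet? st.1 city = some false then
          let vis1 := PySem.List.pySetD st.1 city true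
          let r := pvBfs adj [city] vis1 1
          (r.1, st.2 + (c_lib + (r.2 - 1) * c_road))
        else st) (init, 0)
    res.2

-- ===== PORT B =====

-- find(x): follow parent pointers to the root; fuel parent.length suffices since parents strictly decrease
def pvFind (parent : List Int) (fuel : Nat) (x : Int) : Int :=
  match fuel with
  | 0 => x
  | fuel + 1 =>
    match PySem.List.pyGet? parent x with
    | some p => if p = x then x else pvFind parent fuel p
    | none => x   -- IndexError in Python (outside Pre_)

-- one edge: union by minimum root; a row that is not a pair raises ValueError in Python (outside Pre_)
def pvUnion (parent : List Int) (e : List Int) : List Int :=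
  match e with
  | [u, v] =>
    let ru := pvFind parent parent.length u
    let rv := pvFind parent parent.length v
    if ru ≠ rv then
      if ru < rv then PySem.List.pySetD parent rv ru
      else PySem.List.pySetD parent ru rv
    else parent
  | _ => parent

def roadsAndLibraries_alt (n : Int) (c_lib : Int) (c_road : Int) (cities : List (List Int)) : Int :=
  if c_lib ≤ c_road then n * c_lib
  else
    let parent := cities.foldl pvUnion (PySem.List.pyRange 0 (n + 1) 1)
    let comps : Int :=
      ((PySem.List.pyRange 1 (n + 1) 1).countP
        (fun i => decide (PySem.List.pyGet? parent i = some i)) : Nat)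
    comps * c_lib + (n - comps) * c_road

-- ===== PRECONDITION & SPEC =====
-- Pre_ excludes, when c_road < c_lib, negative city counts n (A accidentally returns 0 there) and
-- edge lists with a row that is not a pair [u,v] with 1 ≤ u,v ≤ n: on such rows A raises
-- ValueError/IndexError or silently relies on Python's negative-index wraparound.
def Pre_roadsAndLibraries (n : Int) (c_lib : Int) (c_road : Int) (cities : List (List Int)) : Prop :=
  c_lib ≤ c_road ∨
    (0 ≤ n ∧ (cities.all (fun e =>
      match e with
      | [u, v] => decide (1 ≤ u ∧ u ≤ n ∧ 1 ≤ v ∧ v ≤ n)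
      | _ => false)) = true)
instance (n : Int) (c_lib : Int) (c_road : Int) (cities : List (List Int)) : Decidable (Pre_roadsAndLibraries n c_lib c_road cities) := by unfold Pre_roadsAndLibraries; infer_instance

def pvWitness_roadsAndLibraries : Int × Int × Int × List (List Int) := (3, 5, 1, [[1, 2]])

def Spec_roadsAndLibraries (n : Int) (c_lib : Int) (c_road : Int) (cities : List (List Int)) (out : Int) : Prop := out = roadsAndLibraries_alt n c_lib c_road cities
instance (n : Int) (c_lib : Int) (c_road : Int) (cities : List (List Int)) (out : Int) : Decidable (Spec_roadsAndLibraries n c_lib c_road cities out) := by unfold Spec_roadsAndLibraries; infer_instance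

-- ===== CLAIM (what is proved, stated in full; the proofs are below) =====
def Claim_equal_roadsAndLibraries : Prop := ∀ (n : Int) (c_lib : Int) (c_road : Int) (cities : List (List Int)), Dom_roadsAndLibraries n c_lib c_road cities → Pre_roadsAndLibraries n c_lib c_road cities → Spec_roadsAndLibraries n c_lib c_road cities (roadsAndLibraries n c_lib c_road cities)

-- ===== LEMMAS AND PROOFS =====

-- ---------- the edge relation generated by the city list ----------

def ERel (cs : List (List Int)) (a b : Int) : Prop := [a, b] ∈ cs ∨ [b, a] ∈ cs

def Reach (cs : List (List Int)) : Int → Int → Prop := Relation.ReflTransGen (ERel cs)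

def CMin (cs : List (List Int)) (i m : Int) : Prop :=
  Reach cs i m ∧ ∀ j, Reach cs i j → m ≤ j

def EdgesOk (n : Int) (cs : List (List Int)) : Prop :=
  ∀ e ∈ cs, ∃ u v, e = [u, v] ∧ 1 ≤ u ∧ u ≤ n ∧ 1 ≤ v ∧ v ≤ n

theorem erel_symm {cs : List (List Int)} {a b : Int} (h : ERel cs a b) : ERel cs b a :=
  h.elim Or.inr Or.inl

theorem reach_symm {cs : List (List Int)} {a b : Int} (h : Reach cs a b) : Reach cs b a := by
  induction h with
  | refl => exact Relation.ReflTransGen.refl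
  | tail _ hstep ih => exact Relation.ReflTransGen.head (erel_symm hstep) ih

theorem reach_trans {cs : List (List Int)} {a b c : Int}
    (h1 : Reach cs a b) (h2 : Reach cs b c) : Reach cs a c :=
  Relation.ReflTransGen.trans h1 h2

theorem erel_range {n : Int} {cs : List (List Int)} (hval : EdgesOk n cs) {a b : Int}
    (h : ERel cs a b) : (1 ≤ a ∧ a ≤ n) ∧ (1 ≤ b ∧ b ≤ n) := by
  rcases h with h | h
  · obtain ⟨u, v, he, hu1, hu2, hv1, hv2⟩ := hval _ h
    simp only [List.cons.injEq, and_true] at he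
    obtain ⟨rfl, rfl, -⟩ := he
    exact ⟨⟨hu1, hu2⟩, hv1, hv2⟩
  · obtain ⟨u, v, he, hu1, hu2, hv1, hv2⟩ := hval _ h
    simp only [List.cons.injEq, and_true] at he
    obtain ⟨rfl, rfl, -⟩ := he
    exact ⟨⟨hv1, hv2⟩, hu1, hu2⟩

theorem reach_range {n : Int} {cs : List (List Int)} (hval : EdgesOk n cs) {a b : Int}
    (h : Reach cs a b) (ha1 : 1 ≤ a) (ha2 : a ≤ n) : 1 ≤ b ∧ b ≤ n := by
  induction h with
  | refl => exact ⟨ha1, ha2⟩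
  | tail _ hstep ih => exact (erel_range hval hstep).2

theorem cmin_unique {cs : List (List Int)} {i m m' : Int}
    (h : CMin cs i m) (h' : CMin cs i m') : m = m' :=
  le_antisymm (h.2 _ h'.1) (h'.2 _ h.1)

theorem cmin_congr {cs : List (List Int)} {i i' m : Int} (hii : Reach cs i i')
    (h : CMin cs i m) : CMin cs i' m :=
  ⟨reach_trans (reach_symm hii) h.1, fun j hj => h.2 j (reach_trans hii hj)⟩

theorem reach_nil {a b : Int} (h : Reach [] a b) : a = b := by
  induction h with
  | refl => rfl
  | tail _ hstep ih => simp [ERel] at hstep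

theorem erel_append_pair {cs : List (List Int)} {u v a b : Int} :
    ERel (cs ++ [[u, v]]) a b ↔ ERel cs a b ∨ (a = u ∧ b = v) ∨ (a = v ∧ b = u) := by
  simp only [ERel, List.mem_append, List.mem_singleton, List.cons.injEq, and_true]
  tauto

theorem reach_mono_pair {cs : List (List Int)} {u v a b : Int} (h : Reach cs a b) :
    Reach (cs ++ [[u, v]]) a b := by
  induction h with
  | refl => exact Relation.ReflTransGen.refl
  | tail _ hstep ih =>
    exact Relation.ReflTransGen.tail ih (erel_append_pair.mpr (Or.inl hstep))

theorem reach_append_edge {cs : List (List Int)} {u v : Int} :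
    Reach (cs ++ [[u, v]]) u v :=
  Relation.ReflTransGen.single (erel_append_pair.mpr (Or.inr (Or.inl ⟨rfl, rfl⟩)))

theorem reach_append_pair {cs : List (List Int)} {u v a b : Int} :
    Reach (cs ++ [[u, v]]) a b ↔
      Reach cs a b ∨ (Reach cs a u ∧ Reach cs v b) ∨ (Reach cs a v ∧ Reach cs u b) := by
  constructor
  · intro h
    induction h with
    | refl => exact Or.inl Relation.ReflTransGen.refl
    | tail _ hstep ih =>
      rcases erel_append_pair.mp hstep with hs | ⟨rfl, rfl⟩ | ⟨rfl, rfl⟩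
      · rcases ih with h1 | ⟨h1, h2⟩ | ⟨h1, h2⟩
        · exact Or.inl (Relation.ReflTransGen.tail h1 hs)
        · exact Or.inr (Or.inl ⟨h1, Relation.ReflTransGen.tail h2 hs⟩)
        · exact Or.inr (Or.inr ⟨h1, Relation.ReflTransGen.tail h2 hs⟩)
      · rcases ih with h1 | ⟨h1, h2⟩ | ⟨h1, h2⟩ <;>
          first
            | exact Or.inr (Or.inl ⟨h1, Relation.ReflTransGen.refl⟩)
            | exact Or.inr (Or.inr ⟨h1, Relation.ReflTransGen.refl⟩)
            | exact Or.inl h1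
      · rcases ih with h1 | ⟨h1, h2⟩ | ⟨h1, h2⟩ <;>
          first
            | exact Or.inr (Or.inl ⟨h1, Relation.ReflTransGen.refl⟩)
            | exact Or.inr (Or.inr ⟨h1, Relation.ReflTransGen.refl⟩)
            | exact Or.inl h1
  · rintro (h | ⟨h1, h2⟩ | ⟨h1, h2⟩)
    · exact reach_mono_pair h
    · exact reach_trans (reach_mono_pair h1)
        (reach_trans reach_append_edge (reach_mono_pair h2))
    · exact reach_trans (reach_mono_pair h1)
        (reach_trans (reach_symm reach_append_edge) (reach_mono_pair h2))

theorem reach_append_pair_connected {cs : List (List Int)} {u v : Int}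
    (huv : Reach cs u v) {a b : Int} :
    Reach (cs ++ [[u, v]]) a b ↔ Reach cs a b := by
  rw [reach_append_pair]
  constructor
  · rintro (h | ⟨h1, h2⟩ | ⟨h1, h2⟩)
    · exact h
    · exact reach_trans h1 (reach_trans huv h2)
    · exact reach_trans h1 (reach_trans (reach_symm huv) h2)
  · exact Or.inl

-- ---------- union-find (port B) invariants ----------

def pvAt (l : List Int) (x : Int) : Int := l.getD x.toNat 0

theorem pyGet?_pvAt (l : List Int) (x : Int) (h1 : 0 ≤ x) (h2 : x < (l.length : Int)) :
    PySem.List.pyGet? l x = some (pvAt l x) := by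
  rw [PySem.List.pyGet?_eq_some_getElem l h1 h2, pvAt,
    List.getD_eq_getElem l 0 (by omega : x.toNat < l.length)]

theorem pvAt_set (l : List Int) (i x v : Int) (hi1 : 0 ≤ i) (hi2 : i < (l.length : Int))
    (hx : 0 ≤ x) :
    pvAt (l.set i.toNat v) x = if x = i then v else pvAt l x := by
  by_cases hxi : x = i
  · subst hxi
    have hlt : x.toNat < (l.set x.toNat v).length := by simp; omega
    rw [if_pos rfl, pvAt, List.getD_eq_getElem _ 0 hlt, List.getElem_set, if_pos rfl]
  · rw [if_neg hxi]
    have hne : i.toNat ≠ x.toNat := by omega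
    rcases Nat.lt_or_ge x.toNat l.length with hlt | hge
    · have hlt' : x.toNat < (l.set i.toNat v).length := by simpa using hlt
      rw [pvAt, pvAt, List.getD_eq_getElem _ 0 hlt', List.getD_eq_getElem _ 0 hlt,
        List.getElem_set, if_neg hne]
    · rw [pvAt, pvAt, List.getD_eq_default _ 0 (by simpa using hge),
        List.getD_eq_default _ 0 hge]

def PWf (l : List Int) : Prop :=
  ∀ x : Int, 0 ≤ x → x < (l.length : Int) →
    (x = 0 → pvAt l x = 0) ∧ (1 ≤ x → 1 ≤ pvAt l x ∧ pvAt l x ≤ x)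

theorem pvFind_succ (parent : List Int) (f : Nat) (x p : Int)
    (h : PySem.List.pyGet? parent x = some p) :
    pvFind parent (f + 1) x = if p = x then x else pvFind parent f p := by
  rw [pvFind, h]

theorem pvFind_root (parent : List Int) (x : Int) (fuel : Nat) (hf : 1 ≤ fuel)
    (h : PySem.List.pyGet? parent x = some x) : pvFind parent fuel x = x := by
  match fuel, hf with
  | f + 1, _ => rw [pvFind_succ parent f x x h, if_pos rfl]

theorem pvFind_spec (parent : List Int) (hw : PWf parent) :
    ∀ (fuel : Nat) (x : Int), 1 ≤ x → x < (parent.length : Int) → x < (fuel : Int) →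
      1 ≤ pvFind parent fuel x ∧ pvFind parent fuel x ≤ x ∧
        PySem.List.pyGet? parent (pvFind parent fuel x) =
          some (pvFind parent fuel x) := by
  intro fuel
  induction fuel with
  | zero => intro x h1 h2 h3; simp at h3; omega
  | succ f ih =>
    intro x h1 h2 h3
    have hget := pyGet?_pvAt parent x (by omega) h2
    have hp := ((hw x (by omega) h2).2 h1)
    rw [pvFind_succ parent f x _ hget]
    by_cases hpx : pvAt parent x = x
    · rw [if_pos hpx, hget, hpx]
      exact ⟨h1, le_refl x, rfl⟩
    · rw [if_neg hpx]
      have hrec := ih (pvAt parent x) hp.1 (by omega) (by push_cast at h3 ⊢; omega)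
      exact ⟨hrec.1, le_trans hrec.2.1 hp.2, hrec.2.2⟩

theorem pvFind_reach (cs : List (List Int)) (parent : List Int) (hw : PWf parent)
    (hre : ∀ x : Int, 1 ≤ x → x < (parent.length : Int) → Reach cs x (pvAt parent x)) :
    ∀ (fuel : Nat) (x : Int), 1 ≤ x → x < (parent.length : Int) → x < (fuel : Int) →
      Reach cs x (pvFind parent fuel x) := by
  intro fuel
  induction fuel with
  | zero => intro x h1 h2 h3; simp at h3; omega
  | succ f ih =>
    intro x h1 h2 h3
    have hget := pyGet?_pvAt parent x (by omega) h2
    have hp := ((hw x (by omega) h2).2 h1)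
    rw [pvFind_succ parent f x _ hget]
    by_cases hpx : pvAt parent x = x
    · rw [if_pos hpx]; exact Relation.ReflTransGen.refl
    · rw [if_neg hpx]
      exact reach_trans (hre x h1 h2) (ih (pvAt parent x) hp.1 (by omega)
        (by push_cast at h3 ⊢; omega))

theorem pvFind_stable (parent : List Int) (hw : PWf parent) (rv ru : Int)
    (hrv1 : 1 ≤ rv) (hrv2 : rv < (parent.length : Int))
    (hfix : pvAt parent rv = rv) :
    ∀ (fuel : Nat) (x : Int), 1 ≤ x → x < (parent.length : Int) → x < (fuel : Int) →
      pvFind parent fuel x ≠ rv →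
      pvFind (parent.set rv.toNat ru) fuel x = pvFind parent fuel x := by
  intro fuel
  induction fuel with
  | zero => intro x h1 h2 h3; simp at h3; omega
  | succ f ih =>
    intro x h1 h2 h3 hne
    have hget := pyGet?_pvAt parent x (by omega) h2
    have hxrv : x ≠ rv := by
      intro hh; subst hh
      rw [pvFind_root parent x (f + 1) (by omega) (by rw [hget, hfix])] at hne
      exact hne rfl
    have hget' : PySem.List.pyGet? (parent.set rv.toNat ru) x = some (pvAt parent x) := by
      rw [pyGet?_pvAt _ x (by omega) (by simpa using h2),
        pvAt_set parent rv x ru (by omega) hrv2 (by omega), if_neg hxrv]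
    have hp := ((hw x (by omega) h2).2 h1)
    rw [pvFind_succ _ f x _ hget] at hne ⊢
    rw [pvFind_succ _ f x _ hget']
    by_cases hpx : pvAt parent x = x
    · simp only [if_pos hpx]
    · simp only [if_neg hpx] at hne ⊢
      exact ih (pvAt parent x) hp.1 (by omega) (by push_cast at h3 ⊢; omega) hne

theorem pvFind_moved (parent : List Int) (hw : PWf parent) (rv ru : Int)
    (hrv1 : 1 ≤ rv) (hrv2 : rv < (parent.length : Int))
    (hru1 : 1 ≤ ru) (hru2 : ru < (parent.length : Int)) (hlt : ru < rv)
    (hfixv : pvAt parent rv = rv) (hfixu : pvAt parent ru = ru) :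
    ∀ (fuel : Nat) (x : Int), 1 ≤ x → x < (parent.length : Int) → x < (fuel : Int) →
      pvFind parent fuel x = rv →
      pvFind (parent.set rv.toNat ru) fuel x = ru := by
  intro fuel
  induction fuel with
  | zero => intro x h1 h2 h3; simp at h3; omega
  | succ f ih =>
    intro x h1 h2 h3 heq
    have hget := pyGet?_pvAt parent x (by omega) h2
    have hp := ((hw x (by omega) h2).2 h1)
    by_cases hpx : pvAt parent x = x
    · -- x is a root of parent, so x = rv; in the new array x points to the root ru
      have hxrv : x = rv := by
        rw [pvFind_succ _ f x _ hget, if_pos hpx] at heq; exact heq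
      rw [hxrv]
      have hget' : PySem.List.pyGet? (parent.set rv.toNat ru) rv = some ru := by
        rw [pyGet?_pvAt _ rv (by omega) (by simpa using hrv2),
          pvAt_set parent rv rv ru (by omega) hrv2 (by omega), if_pos rfl]
      rw [pvFind_succ _ f rv _ hget', if_neg (by omega : ¬ ru = rv)]
      refine pvFind_root _ ru f (by push_cast at h3; omega) ?_
      rw [pyGet?_pvAt _ ru (by omega) (by simpa using hru2),
        pvAt_set parent rv ru ru (by omega) hrv2 (by omega), if_neg (by omega), hfixu]
    · have hxrv : x ≠ rv := by intro hh; subst hh; exact hpx hfixv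
      have hget' : PySem.List.pyGet? (parent.set rv.toNat ru) x = some (pvAt parent x) := by
        rw [pyGet?_pvAt _ x (by omega) (by simpa using h2),
          pvAt_set parent rv x ru (by omega) hrv2 (by omega), if_neg hxrv]
      rw [pvFind_succ _ f x _ hget, if_neg hpx] at heq
      rw [pvFind_succ _ f x _ hget', if_neg hpx]
      exact ih (pvAt parent x) hp.1 (by omega) (by push_cast at h3 ⊢; omega) heq

def UFInv (n : Int) (cs : List (List Int)) (parent : List Int) : Prop :=
  parent.length = (n + 1).toNat ∧ PWf parent ∧
  (∀ x : Int, 1 ≤ x → x < (parent.length : Int) → Reach cs x (pvAt parent x)) ∧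
  (∀ x : Int, 1 ≤ x → x ≤ n → CMin cs x (pvFind parent parent.length x))

theorem ufinv_congr (n : Int) (cs1 cs2 : List (List Int)) (parent : List Int)
    (hiff : ∀ a b : Int, Reach cs1 a b ↔ Reach cs2 a b) (h : UFInv n cs1 parent) :
    UFInv n cs2 parent := by
  obtain ⟨hlen, hw, hre, hmin⟩ := h
  refine ⟨hlen, hw, fun x h1 h2 => (hiff _ _).mp (hre x h1 h2), fun x h1 h2 => ?_⟩
  obtain ⟨hr, hm⟩ := hmin x h1 h2
  exact ⟨(hiff _ _).mp hr, fun j hj => hm j ((hiff _ _).mpr hj)⟩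

theorem ufinv_nil (n : Int) (hn : 0 ≤ n) : UFInv n [] (PySem.List.pyRange 0 (n + 1) 1) := by
  have hlen : (PySem.List.pyRange 0 (n + 1) 1).length = (n + 1).toNat := by
    rw [PySem.List.length_pyRange_one]; congr 1; omega
  have hat : ∀ x : Int, 0 ≤ x → x < ((PySem.List.pyRange 0 (n + 1) 1).length : Int) →
      pvAt (PySem.List.pyRange 0 (n + 1) 1) x = x := by
    intro x h1 h2
    rw [pvAt, List.getD_eq_getElem _ 0 (by omega), PySem.List.getElem_pyRange_one]
    omega
  have hw : PWf (PySem.List.pyRange 0 (n + 1) 1) := by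
    intro x h1 h2
    rw [hat x h1 h2]
    exact ⟨fun h0 => h0, fun hx => ⟨hx, le_refl x⟩⟩
  refine ⟨hlen, hw, fun x h1 h2 => by rw [hat x (by omega) h2]; exact Relation.ReflTransGen.refl, fun x h1 h2 => ?_⟩
  have hxL : x < ((PySem.List.pyRange 0 (n + 1) 1).length : Int) := by
    rw [hlen]; omega
  have hfind : pvFind (PySem.List.pyRange 0 (n + 1) 1)
      (PySem.List.pyRange 0 (n + 1) 1).length x = x := by
    refine pvFind_root _ x _ (by rw [hlen]; omega) ?_
    rw [pyGet?_pvAt _ x (by omega) hxL, hat x (by omega) hxL]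
  rw [hfind]
  exact ⟨Relation.ReflTransGen.refl, fun j hj => le_of_eq (reach_nil hj)⟩

theorem uf_link (n : Int) (cs : List (List Int)) (parent : List Int)
    (h : UFInv n cs parent) (u v : Int)
    (hu1 : 1 ≤ u) (hu2 : u ≤ n) (hv1 : 1 ≤ v) (hv2 : v ≤ n)
    (hlt : pvFind parent parent.length u < pvFind parent parent.length v) :
    UFInv n (cs ++ [[u, v]])
      (PySem.List.pySetD parent (pvFind parent parent.length v)
        (pvFind parent parent.length u)) := by
  obtain ⟨hlen, hw, hre, hmin⟩ := h
  have hn : 0 ≤ n := by omega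
  have hLen : ((parent.length : Nat) : Int) = n + 1 := by omega
  set L := parent.length with hL
  set ru := pvFind parent L u with hru
  set rv := pvFind parent L v with hrv
  have hus := pvFind_spec parent hw L u hu1 (by omega) (by omega)
  have hvs := pvFind_spec parent hw L v hv1 (by omega) (by omega)
  have hru1 : 1 ≤ ru := hus.1
  have hruL : ru < (L : Int) := by have := hus.2.1; omega
  have hrv1 : 1 ≤ rv := hvs.1
  have hrvL : rv < (L : Int) := by have := hvs.2.1; omega
  have hfixu : pvAt parent ru = ru := by
    have h' := hus.2.2
    rw [pyGet?_pvAt parent ru (by omega) hruL] at h'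
    exact Option.some.inj h'
  have hfixv : pvAt parent rv = rv := by
    have h' := hvs.2.2
    rw [pyGet?_pvAt parent rv (by omega) hrvL] at h'
    exact Option.some.inj h'
  have hminu : CMin cs u ru := hmin u hu1 hu2
  have hminv : CMin cs v rv := hmin v hv1 hv2
  rw [PySem.List.pySetD_of_nonneg parent ru (by omega : (0:Int) ≤ rv)]
  set parent' := parent.set rv.toNat ru with hp'
  have hlen' : parent'.length = L := by simp [hp', hL]
  have hat' : ∀ x : Int, 0 ≤ x → pvAt parent' x = if x = rv then ru else pvAt parent x :=
    fun x hx => pvAt_set parent rv x ru (by omega) hrvL hx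
  have hw' : PWf parent' := by
    intro x h1 h2
    rw [hlen'] at h2
    rw [hat' x h1]
    by_cases hxrv : x = rv
    · rw [if_pos hxrv]
      exact ⟨fun h0 => by omega, fun hx => ⟨hru1, by omega⟩⟩
    · rw [if_neg hxrv]; exact hw x h1 h2
  have hreach_rv_ru : Reach (cs ++ [[u, v]]) rv ru := by
    have h1 : Reach (cs ++ [[u, v]]) rv v := reach_symm (reach_mono_pair hminv.1)
    have h2 : Reach (cs ++ [[u, v]]) v u := reach_symm reach_append_edge
    have h3 : Reach (cs ++ [[u, v]]) u ru := reach_mono_pair hminu.1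
    exact reach_trans h1 (reach_trans h2 h3)
  have hre' : ∀ x : Int, 1 ≤ x → x < (parent'.length : Int) →
      Reach (cs ++ [[u, v]]) x (pvAt parent' x) := by
    intro x h1 h2
    rw [hlen'] at h2
    rw [hat' x (by omega)]
    by_cases hxrv : x = rv
    · rw [if_pos hxrv, hxrv]; exact hreach_rv_ru
    · rw [if_neg hxrv]; exact reach_mono_pair (hre x h1 h2)
  refine ⟨by rw [hlen', hlen], hw', hre', ?_⟩
  intro x h1 h2
  have hxL : x < (L : Int) := by omega
  set r := pvFind parent L x with hr
  have hminx : CMin cs x r := hmin x h1 h2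
  have hreachxr : Reach (cs ++ [[u, v]]) x r :=
    reach_mono_pair (pvFind_reach cs parent hw hre L x h1 hxL (by omega))
  by_cases hcase : r = rv
  · have hfind' : pvFind parent' parent'.length x = ru := by
      rw [hlen']
      exact pvFind_moved parent hw rv ru hrv1 hrvL hru1 hruL hlt hfixv hfixu L x h1 hxL
        (by omega) hcase
    rw [hfind']
    constructor
    · rw [hcase] at hreachxr
      exact reach_trans hreachxr hreach_rv_ru
    · intro j hj
      rcases reach_append_pair.mp hj with hj1 | ⟨hj1, hj2⟩ | ⟨hj1, hj2⟩
      · have := hminx.2 j hj1; omega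
      · have := hminv.2 j hj2; omega
      · have := hminu.2 j hj2; omega
  · have hfind' : pvFind parent' parent'.length x = r := by
      rw [hlen']
      exact pvFind_stable parent hw rv ru hrv1 hrvL hfixv L x h1 hxL (by omega) hcase
    rw [hfind']
    constructor
    · exact hreachxr
    · intro j hj
      rcases reach_append_pair.mp hj with hj1 | ⟨hj1, hj2⟩ | ⟨hj1, hj2⟩
      · exact hminx.2 j hj1
      · have hr_ru : r = ru := cmin_unique (cmin_congr hj1 hminx) hminu
        have := hminv.2 j hj2; omega
      · exact absurd (cmin_unique (cmin_congr hj1 hminx) hminv) hcase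

theorem reach_pair_comm {cs : List (List Int)} {u v a b : Int} :
    Reach (cs ++ [[u, v]]) a b ↔ Reach (cs ++ [[v, u]]) a b := by
  rw [reach_append_pair, reach_append_pair]
  tauto

theorem uf_union (n : Int) (cs : List (List Int)) (parent : List Int)
    (h : UFInv n cs parent) (u v : Int)
    (hu1 : 1 ≤ u) (hu2 : u ≤ n) (hv1 : 1 ≤ v) (hv2 : v ≤ n) :
    UFInv n (cs ++ [[u, v]]) (pvUnion parent [u, v]) := by
  have hminu := h.2.2.2 u hu1 hu2
  have hminv := h.2.2.2 v hv1 hv2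
  rw [pvUnion]
  by_cases hne : pvFind parent parent.length u ≠ pvFind parent parent.length v
  · rw [if_pos hne]
    by_cases hlt : pvFind parent parent.length u < pvFind parent parent.length v
    · rw [if_pos hlt]
      exact uf_link n cs parent h u v hu1 hu2 hv1 hv2 hlt
    · rw [if_neg hlt]
      have hlt' : pvFind parent parent.length v < pvFind parent parent.length u := by omega
      exact ufinv_congr n (cs ++ [[v, u]]) (cs ++ [[u, v]]) _
        (fun a b => reach_pair_comm.symm)
        (uf_link n cs parent h v u hv1 hv2 hu1 hu2 hlt')
  · rw [if_neg hne]
    push Not at hne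
    have huv : Reach cs u v := by
      refine reach_trans hminu.1 ?_
      rw [hne]
      exact reach_symm hminv.1
    exact ufinv_congr n cs (cs ++ [[u, v]]) parent
      (fun a b => (reach_append_pair_connected huv).symm) h

theorem uf_fold (n : Int) :
    ∀ (rest pre : List (List Int)) (parent : List Int),
      UFInv n pre parent → EdgesOk n rest →
      UFInv n (pre ++ rest) (rest.foldl pvUnion parent) := by
  intro rest
  induction rest with
  | nil => intro pre parent h _; simpa using h
  | cons e rest' ih =>
    intro pre parent h hok
    obtain ⟨u, v, rfl, hu1, hu2, hv1, hv2⟩ := hok e (List.mem_cons_self)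
    have h1 := uf_union n pre parent h u v hu1 hu2 hv1 hv2
    have h2 := ih (pre ++ [[u, v]]) (pvUnion parent [u, v]) h1
      (fun e' he' => hok e' (List.mem_cons_of_mem _ he'))
    simpa [List.append_assoc] using h2

theorem uf_char (n : Int) (cities : List (List Int)) (hval : EdgesOk n cities)
    (i : Int) (hi1 : 1 ≤ i) (hi2 : i ≤ n) :
    (PySem.List.pyGet? (cities.foldl pvUnion (PySem.List.pyRange 0 (n + 1) 1)) i =
      some i) ↔ CMin cities i i := by
  have hn : 0 ≤ n := by omega
  have hinv : UFInv n cities (cities.foldl pvUnion (PySem.List.pyRange 0 (n + 1) 1)) := by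
    have := uf_fold n cities [] (PySem.List.pyRange 0 (n + 1) 1) (ufinv_nil n hn) hval
    simpa using this
  obtain ⟨hlen, hw, hre, hmin⟩ := hinv
  set parentF := cities.foldl pvUnion (PySem.List.pyRange 0 (n + 1) 1) with hpF
  have hLen : ((parentF.length : Nat) : Int) = n + 1 := by omega
  have hiL : i < (parentF.length : Int) := by omega
  rw [pyGet?_pvAt parentF i (by omega) hiL]
  constructor
  · intro hsome
    have hfix : pvAt parentF i = i := Option.some.inj hsome
    have hfind : pvFind parentF parentF.length i = i := by
      refine pvFind_root _ i _ (by omega) ?_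
      rw [pyGet?_pvAt parentF i (by omega) hiL, hfix]
    have := hmin i hi1 hi2
    rwa [hfind] at this
  · intro hcmin
    have hfind : pvFind parentF parentF.length i = i :=
      cmin_unique (hmin i hi1 hi2) hcmin
    by_contra hne
    have hp := (hw i (by omega) hiL).2 hi1
    have hpi : pvAt parentF i ≠ i := fun hh => hne (by rw [hh])
    have hplt : pvAt parentF i < i := by omega
    obtain ⟨f, hf⟩ : ∃ f, parentF.length = f + 1 := by
      refine ⟨parentF.length - 1, by omega⟩
    have hstep : pvFind parentF parentF.length i =
        pvFind parentF f (pvAt parentF i) := by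
      rw [hf, pvFind_succ parentF f i _ (pyGet?_pvAt parentF i (by omega) hiL),
        if_neg hpi]
    have hspec := pvFind_spec parentF hw f (pvAt parentF i) hp.1 (by omega)
      (by omega)
    rw [hstep] at hfind
    omega

-- ---------- BFS (port A) invariants ----------

theorem adj_mem (cs : List (List Int)) :
    ∀ (d : PySem.Dict Int (List Int)) (a b : Int),
      b ∈ (cs.foldl pvAdjStep d).getD a [] ↔ b ∈ d.getD a [] ∨ ERel cs a b := by
  induction cs with
  | nil => intro d a b; simp [ERel]
  | cons e rest ih =>
    intro d a b
    rw [List.foldl_cons, ih (pvAdjStep d e) a b]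
    have herel : ERel (e :: rest) a b ↔ ([a, b] = e ∨ [b, a] = e) ∨ ERel rest a b := by
      simp only [ERel, List.mem_cons]; tauto
    rw [herel]
    match e with
    | [] => simp [pvAdjStep]
    | [x] => simp [pvAdjStep]
    | x :: y :: z :: t => simp [pvAdjStep]
    | [u, v] =>
      have hmem : b ∈ (pvAdjStep d [u, v]).getD a [] ↔
          b ∈ d.getD a [] ∨ (a = u ∧ b = v) ∨ (a = v ∧ b = u) := by
        rw [pvAdjStep]
        by_cases hav : a = v
        · subst hav
          by_cases hau : a = u
          · subst hau
            simp [List.mem_append]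
          · simp [PySem.Dict.getD_modify, List.mem_append, hau]
        · by_cases hau : a = u
          · subst hau
            simp [PySem.Dict.getD_modify, List.mem_append, hav]
          · simp [PySem.Dict.getD_modify, hav, hau]
      rw [hmem]
      simp only [List.cons.injEq, and_true]
      tauto

theorem pyGet?_getD_bool (l : List Bool) (x : Int) (h1 : 0 ≤ x) (h2 : x < (l.length : Int)) :
    PySem.List.pyGet? l x = some (l.getD x.toNat false) := by
  rw [PySem.List.pyGet?_eq_some_getElem l h1 h2,
    List.getD_eq_getElem l false (by omega : x.toNat < l.length)]

theorem getD_set_bool (l : List Bool) (i x : Int) (v : Bool)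
    (hi1 : 0 ≤ i) (hi2 : i < (l.length : Int)) (hx : 0 ≤ x) :
    (l.set i.toNat v).getD x.toNat false = if x = i then v else l.getD x.toNat false := by
  by_cases hxi : x = i
  · subst hxi
    have hlt : x.toNat < (l.set x.toNat v).length := by simp; omega
    rw [if_pos rfl, List.getD_eq_getElem _ false hlt, List.getElem_set, if_pos rfl]
  · rw [if_neg hxi]
    have hne : i.toNat ≠ x.toNat := by omega
    rcases Nat.lt_or_ge x.toNat l.length with hlt | hge
    · have hlt' : x.toNat < (l.set i.toNat v).length := by simpa using hlt
      rw [List.getD_eq_getElem _ false hlt', List.getD_eq_getElem _ false hlt,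
        List.getElem_set, if_neg hne]
    · rw [List.getD_eq_default _ false (by simpa using hge),
        List.getD_eq_default _ false hge]

def MkP (n : Int) (vis : List Bool) (x : Int) : Prop :=
  1 ≤ x ∧ x ≤ n ∧ vis.getD x.toNat false = true

theorem mkP_set (n : Int) (vis : List Bool) (i : Int)
    (hi1 : 1 ≤ i) (hi2 : i ≤ n) (hlen : vis.length = (n + 1).toNat) :
    ∀ x : Int, MkP n (PySem.List.pySetD vis i true) x ↔ MkP n vis x ∨ x = i := by
  intro x
  rw [PySem.List.pySetD_of_nonneg vis true (by omega : (0:Int) ≤ i)]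
  by_cases hx : 1 ≤ x ∧ x ≤ n
  · rw [MkP, MkP, getD_set_bool vis i x true (by omega) (by omega) (by omega)]
    by_cases hxi : x = i
    · simp [hxi, hi1, hi2]
    · simp [hxi, hx.1, hx.2]
  · constructor
    · intro h; exact absurd ⟨h.1, h.2.1⟩ hx
    · rintro (h | rfl)
      · exact absurd ⟨h.1, h.2.1⟩ hx
      · exact absurd ⟨hi1, hi2⟩ hx

theorem zero_set_bool (vis : List Bool) (i : Int) (hi1 : 1 ≤ i)
    (hi2 : i < (vis.length : Int)) :
    (PySem.List.pySetD vis i true).getD 0 false = vis.getD 0 false := by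
  rw [PySem.List.pySetD_of_nonneg vis true (by omega : (0:Int) ≤ i)]
  have h := getD_set_bool vis i 0 true (by omega) hi2 (by omega)
  simpa [if_neg (by omega : ¬ (0:Int) = i)] using h

theorem pvScan_spec (n : Int) (adj : PySem.Dict Int (List Int)) (nbrs : List Int) :
    ∀ (q : List Int) (vis : List Bool) (cnt : Int),
      vis.length = (n + 1).toNat →
      (∀ y ∈ nbrs, 1 ≤ y ∧ y ≤ n) →
      ((∀ x ∈ (pvScan adj nbrs q vis cnt).1, x ∈ q ∨ x ∈ nbrs) ∧
       (∀ x, MkP n (pvScan adj nbrs q vis cnt).2.1 x → MkP n vis x ∨ x ∈ nbrs) ∧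
       (∀ y ∈ nbrs, MkP n (pvScan adj nbrs q vis cnt).2.1 y) ∧
       (∀ x ∈ q, x ∈ (pvScan adj nbrs q vis cnt).1) ∧
       ((pvScan adj nbrs q vis cnt).2.2 + ((pvScan adj nbrs q vis cnt).2.1.count false : Int)
          = cnt + (vis.count false : Int)) ∧
       (pvScan adj nbrs q vis cnt).2.1.length = vis.length ∧
       (∀ x, MkP n vis x → MkP n (pvScan adj nbrs q vis cnt).2.1 x) ∧
       (∀ x, MkP n (pvScan adj nbrs q vis cnt).2.1 x → ¬ MkP n vis x →
          x ∈ (pvScan adj nbrs q vis cnt).1) ∧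
       (pvScan adj nbrs q vis cnt).2.1.getD 0 false = vis.getD 0 false) := by
  induction nbrs with
  | nil =>
    intro q vis cnt hlen _
    refine ⟨fun x hx => Or.inl hx, fun x hx => Or.inl hx, by simp, fun x hx => hx,
      by simp [pvScan], rfl, fun x hx => hx, fun x hx hnx => absurd hx hnx, rfl⟩
  | cons nb rest ih =>
    intro q vis cnt hlen hval
    have hnb := hval nb List.mem_cons_self
    have hval' : ∀ y ∈ rest, 1 ≤ y ∧ y ≤ n := fun y hy => hval y (List.mem_cons_of_mem _ hy)
    have hnbL : nb < (vis.length : Int) := by omega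
    rw [pvScan]
    by_cases hcond : PySem.List.pyGet? vis nb = some false
    · rw [if_pos hcond]
      have hsc := pv_set_count vis nb hcond
      have hmk := mkP_set n vis nb hnb.1 hnb.2 hlen
      have hlen1 : (PySem.List.pySetD vis nb true).length = (n + 1).toNat := by
        rw [hsc.2, hlen]
      obtain ⟨s1, s2, s3, s4, s5, s6, s7, s8, s9⟩ :=
        ih (q ++ [nb]) (PySem.List.pySetD vis nb true) (cnt + 1) hlen1 hval'
      refine ⟨?_, ?_, ?_, ?_, ?_, ?_, ?_, ?_, ?_⟩
      · intro x hx
        rcases s1 x hx with hx1 | hx1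
        · rcases List.mem_append.mp hx1 with h | h
          · exact Or.inl h
          · simp only [List.mem_singleton] at h
            exact Or.inr (h ▸ List.mem_cons_self)
        · exact Or.inr (List.mem_cons_of_mem _ hx1)
      · intro x hx
        rcases s2 x hx with hx1 | hx1
        · rcases (hmk x).mp hx1 with h | h
          · exact Or.inl h
          · exact Or.inr (h ▸ List.mem_cons_self)
        · exact Or.inr (List.mem_cons_of_mem _ hx1)
      · intro y hy
        rcases List.mem_cons.mp hy with rfl | hy'
        · exact s7 y ((hmk y).mpr (Or.inr rfl))
        · exact s3 y hy'
      · intro x hx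
        exact s4 x (List.mem_append.mpr (Or.inl hx))
      · have := hsc.1
        omega
      · rw [s6, hsc.2]
      · intro x hx
        exact s7 x ((hmk x).mpr (Or.inl hx))
      · intro x hx hnx
        by_cases hx1 : MkP n (PySem.List.pySetD vis nb true) x
        · rcases (hmk x).mp hx1 with h | rfl
          · exact absurd h hnx
          · exact s4 x (List.mem_append.mpr (Or.inr (List.mem_singleton_self x)))
        · exact s8 x hx hx1
      · rw [s9, zero_set_bool vis nb hnb.1 hnbL]
    · rw [if_neg hcond]
      have hvnb : vis.getD nb.toNat false = true := by
        have hg := pyGet?_getD_bool vis nb (by omega) hnbL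
        rcases Bool.eq_false_or_eq_true (vis.getD nb.toNat false) with h | h
        · exact h
        · rw [h] at hg; exact absurd hg hcond
      obtain ⟨s1, s2, s3, s4, s5, s6, s7, s8, s9⟩ := ih q vis cnt hlen hval'
      refine ⟨fun x hx => (s1 x hx).imp id (List.mem_cons_of_mem _), ?_, ?_, s4, s5, s6, s7, s8, s9⟩
      · intro x hx
        exact (s2 x hx).imp id (List.mem_cons_of_mem _)
      · intro y hy
        rcases List.mem_cons.mp hy with rfl | hy'
        · exact s7 y ⟨hnb.1, hnb.2, hvnb⟩
        · exact s3 y hy'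

theorem pvBfs_spec (n s : Int) (cities : List (List Int)) (adj : PySem.Dict Int (List Int))
    (hadj : ∀ a b : Int, b ∈ adj.getD a [] ↔ ERel cities a b)
    (hval : EdgesOk n cities) (M : Int → Prop) :
    ∀ (q : List Int) (vis : List Bool) (cnt : Int),
      vis.length = (n + 1).toNat →
      (∀ x ∈ q, MkP n vis x ∧ Reach cities s x) →
      (∀ x, MkP n vis x → x ∉ q → ∀ y, ERel cities x y → MkP n vis y) →
      (∀ x, MkP n vis x → M x ∨ Reach cities s x) →
      ((pvBfs adj q vis cnt).1.length = vis.length ∧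
       (∀ x, MkP n vis x → MkP n (pvBfs adj q vis cnt).1 x) ∧
       (∀ x, MkP n (pvBfs adj q vis cnt).1 x → M x ∨ Reach cities s x) ∧
       (∀ x, MkP n (pvBfs adj q vis cnt).1 x → ∀ y, ERel cities x y →
          MkP n (pvBfs adj q vis cnt).1 y) ∧
       ((pvBfs adj q vis cnt).2 + ((pvBfs adj q vis cnt).1.count false : Int)
          = cnt + (vis.count false : Int)) ∧
       (pvBfs adj q vis cnt).1.getD 0 false = vis.getD 0 false) := by
  have pvBfs_nil : ∀ vis cnt, pvBfs adj [] vis cnt = (vis, cnt) := fun vis cnt => by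
    rw [pvBfs]
  have pvBfs_cons : ∀ node rest vis cnt, pvBfs adj (node :: rest) vis cnt =
      pvBfs adj (pvScan adj (adj.getD node []) rest vis cnt).1
        (pvScan adj (adj.getD node []) rest vis cnt).2.1
        (pvScan adj (adj.getD node []) rest vis cnt).2.2 := fun node rest vis cnt => by
    rw [pvBfs]
  intro q vis cnt
  induction q, vis, cnt using pvBfs.induct adj with
  | case1 vis cnt =>
    intro hlen hq hproc hsub
    rw [pvBfs_nil]
    exact ⟨rfl, fun x hx => hx, hsub,
      fun x hx y hy => hproc x hx (List.not_mem_nil) y hy,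
      by simp, rfl⟩
  | case2 vis cnt node rest sv ih =>
    intro hlen hq hproc hsub
    have hsv : sv = pvScan adj (adj.getD node []) rest vis cnt := rfl
    rw [pvBfs_cons]
    set st := pvScan adj (adj.getD node []) rest vis cnt with hst
    rw [hsv] at ih
    have hvalid : ∀ y ∈ adj.getD node [], 1 ≤ y ∧ y ≤ n := by
      intro y hy
      exact (erel_range hval ((hadj node y).mp hy)).2
    obtain ⟨s1, s2, s3, s4, s5, s6, s7, s8, s9⟩ :=
      pvScan_spec n adj (adj.getD node []) rest vis cnt hlen hvalid
    rw [← hst] at s1 s2 s3 s4 s5 s6 s7 s8 s9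
    have hnode := hq node List.mem_cons_self
    have hq' : ∀ x ∈ st.1, MkP n st.2.1 x ∧ Reach cities s x := by
      intro x hx
      rcases s1 x hx with hx1 | hx1
      · have h := hq x (List.mem_cons_of_mem _ hx1)
        exact ⟨s7 x h.1, h.2⟩
      · exact ⟨s3 x hx1, Relation.ReflTransGen.tail hnode.2 ((hadj node x).mp hx1)⟩
    have hproc' : ∀ x, MkP n st.2.1 x → x ∉ st.1 → ∀ y, ERel cities x y → MkP n st.2.1 y := by
      intro x hx hnx y hy
      by_cases hvx : MkP n vis x
      · by_cases hxn : x = node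
        · subst hxn
          exact s3 y ((hadj x y).mpr hy)
        · have hxr : x ∉ rest := fun hh => hnx (s4 x hh)
          have : x ∉ node :: rest := by
            simp only [List.mem_cons]
            push Not
            exact ⟨hxn, hxr⟩
          exact s7 y (hproc x hvx this y hy)
      · exact absurd (s8 x hx hvx) hnx
    have hsub' : ∀ x, MkP n st.2.1 x → M x ∨ Reach cities s x := by
      intro x hx
      rcases s2 x hx with hx1 | hx1
      · exact hsub x hx1
      · exact Or.inr (Relation.ReflTransGen.tail hnode.2 ((hadj node x).mp hx1))
    obtain ⟨c1, c2, c3, c4, c5, c6⟩ := ih (by rw [s6, hlen]) hq' hproc' hsub'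
    refine ⟨by rw [c1, s6], fun x hx => c2 x (s7 x hx), c3, c4, ?_, by rw [c6, s9]⟩
    rw [c5]
    omega

theorem pvBfs_launch (n s : Int) (cities : List (List Int)) (adj : PySem.Dict Int (List Int))
    (hadj : ∀ a b : Int, b ∈ adj.getD a [] ↔ ERel cities a b)
    (hval : EdgesOk n cities) (hs1 : 1 ≤ s) (hs2 : s ≤ n)
    (vis : List Bool) (hlen : vis.length = (n + 1).toNat)
    (hclosed : ∀ x, MkP n vis x → ∀ y, ERel cities x y → MkP n vis y)
    (hnot : vis.getD s.toNat false = false) :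
    ((∀ x, MkP n (pvBfs adj [s] (PySem.List.pySetD vis s true) 1).1 x ↔
        MkP n vis x ∨ (1 ≤ x ∧ x ≤ n ∧ Reach cities s x)) ∧
     ((pvBfs adj [s] (PySem.List.pySetD vis s true) 1).2 +
        ((pvBfs adj [s] (PySem.List.pySetD vis s true) 1).1.count false : Int)
          = (vis.count false : Int)) ∧
     (pvBfs adj [s] (PySem.List.pySetD vis s true) 1).1.length = vis.length ∧
     (pvBfs adj [s] (PySem.List.pySetD vis s true) 1).1.getD 0 false
        = vis.getD 0 false) := by
  have hsL : s < (vis.length : Int) := by omega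
  have hget : PySem.List.pyGet? vis s = some false := by
    rw [pyGet?_getD_bool vis s (by omega) hsL, hnot]
  have hsc := pv_set_count vis s hget
  have hmk := mkP_set n vis s hs1 hs2 hlen
  have hlen1 : (PySem.List.pySetD vis s true).length = (n + 1).toNat := by rw [hsc.2, hlen]
  have hq : ∀ x ∈ [s], MkP n (PySem.List.pySetD vis s true) x ∧ Reach cities s x := by
    intro x hx
    simp only [List.mem_singleton] at hx
    subst hx
    exact ⟨(hmk x).mpr (Or.inr rfl), Relation.ReflTransGen.refl⟩
  have hproc : ∀ x, MkP n (PySem.List.pySetD vis s true) x → x ∉ [s] →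
      ∀ y, ERel cities x y → MkP n (PySem.List.pySetD vis s true) y := by
    intro x hx hnx y hy
    rcases (hmk x).mp hx with h | rfl
    · exact (hmk y).mpr (Or.inl (hclosed x h y hy))
    · exact absurd (List.mem_singleton_self x) hnx
  have hsub : ∀ x, MkP n (PySem.List.pySetD vis s true) x → MkP n vis x ∨ Reach cities s x := by
    intro x hx
    rcases (hmk x).mp hx with h | rfl
    · exact Or.inl h
    · exact Or.inr Relation.ReflTransGen.refl
  obtain ⟨c1, c2, c3, c4, c5, c6⟩ :=
    pvBfs_spec n s cities adj hadj hval (MkP n vis) [s] (PySem.List.pySetD vis s true) 1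
      hlen1 hq hproc hsub
  refine ⟨?_, by rw [c5]; omega, by rw [c1, hsc.2], by
    rw [c6, zero_set_bool vis s hs1 hsL]⟩
  intro x
  constructor
  · intro hx
    rcases c3 x hx with h | h
    · exact Or.inl h
    · exact Or.inr ⟨hx.1, hx.2.1, h⟩
  · rintro (hx | ⟨hx1, hx2, hx3⟩)
    · exact c2 x ((hmk x).mpr (Or.inl hx))
    · have key : ∀ y, Reach cities s y → 1 ≤ y → y ≤ n →
          MkP n (pvBfs adj [s] (PySem.List.pySetD vis s true) 1).1 y := by
        intro y hy
        induction hy with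
        | refl => intro _ _; exact c2 s ((hmk s).mpr (Or.inr rfl))
        | @tail b c hab hstep ihr =>
          intro _ _
          have hbrange := reach_range hval hab hs1 hs2
          exact c4 b (ihr hbrange.1 hbrange.2) c hstep
      exact key x hx3 hx1 hx2

-- ---------- the outer loop of A and the final assembly ----------

def pvBody (adj : PySem.Dict Int (List Int)) (c_lib c_road : Int)
    (st : List Bool × Int) (city : Int) : List Bool × Int :=
  if PySem.List.pyGet? st.1 city = some false then
    let vis1 := PySem.List.pySetD st.1 city true
    let r := pvBfs adj [city] vis1 1
    (r.1, st.2 + (c_lib + (r.2 - 1) * c_road))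
  else st

theorem roads_eq (n c_lib c_road : Int) (cities : List (List Int)) :
    roadsAndLibraries n c_lib c_road cities =
      if c_lib ≤ c_road then n * c_lib
      else ((PySem.List.pyRange 1 (n + 1) 1).foldl
        (pvBody (cities.foldl pvAdjStep PySem.Dict.empty) c_lib c_road)
        (List.replicate (n + 1).toNat false, 0)).2 := rfl

def pvPb (n : Int) (cities : List (List Int)) (i : Int) : Bool :=
  decide (PySem.List.pyGet? (cities.foldl pvUnion (PySem.List.pyRange 0 (n + 1) 1)) i
    = some i)

def OutInv (n c_lib c_road : Int) (cities : List (List Int)) (m : Int)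
    (st : List Bool × Int) : Prop :=
  st.1.length = (n + 1).toNat ∧
  st.1.getD 0 false = false ∧
  (∀ x : Int, 1 ≤ x → x ≤ n →
    (st.1.getD x.toNat false = true ↔ ∃ j, 1 ≤ j ∧ j < m ∧ Reach cities j x)) ∧
  st.2 = ((PySem.List.pyRange 1 m 1).countP (pvPb n cities) : Int) * c_lib +
    ((n + 1 - (st.1.count false : Int)) -
      ((PySem.List.pyRange 1 m 1).countP (pvPb n cities) : Int)) * c_road

theorem pvPb_iff (n : Int) (cities : List (List Int)) (hval : EdgesOk n cities)
    (i : Int) (hi1 : 1 ≤ i) (hi2 : i ≤ n) :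
    pvPb n cities i = true ↔ CMin cities i i := by
  rw [pvPb, decide_eq_true_iff]
  exact uf_char n cities hval i hi1 hi2

theorem cmin_self_of_not_before (n : Int) (cities : List (List Int))
    (hval : EdgesOk n cities) (m : Int) (hm1 : 1 ≤ m) (hm2 : m ≤ n)
    (hnb : ¬ ∃ j, 1 ≤ j ∧ j < m ∧ Reach cities j m) : CMin cities m m := by
  refine ⟨Relation.ReflTransGen.refl, fun j hj => ?_⟩
  have hr := reach_range hval hj hm1 hm2
  by_contra hlt
  exact hnb ⟨j, hr.1, by omega, reach_symm hj⟩

theorem not_cmin_of_before (cities : List (List Int)) (m : Int)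
    (hb : ∃ j, 1 ≤ j ∧ j < m ∧ Reach cities j m) : ¬ CMin cities m m := by
  obtain ⟨j, hj1, hj2, hj3⟩ := hb
  intro hc
  have := hc.2 j (reach_symm hj3)
  omega

theorem countP_succ (p : Int → Bool) (m : Int) (hm : 1 ≤ m) :
    (PySem.List.pyRange 1 (m + 1) 1).countP p =
      (PySem.List.pyRange 1 m 1).countP p + (if p m then 1 else 0) := by
  rw [PySem.List.pyRange_one_succ_right hm, List.countP_append]
  simp [List.countP_cons]

theorem getD_replicate_false (k i : Nat) : (List.replicate k false).getD i false = false := by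
  rcases Nat.lt_or_ge i k with h | h
  · rw [List.getD_eq_getElem _ _ (by simpa using h), List.getElem_replicate]
  · rw [List.getD_eq_default _ _ (by simpa using h)]

theorem out_base (n c_lib c_road : Int) (cities : List (List Int)) (hn : 0 ≤ n) :
    OutInv n c_lib c_road cities 1 (List.replicate (n + 1).toNat false, 0) := by
  refine ⟨by simp, getD_replicate_false _ 0, ?_, ?_⟩
  · intro x h1 h2
    rw [getD_replicate_false]
    constructor
    · intro h; exact absurd h (by simp)
    · rintro ⟨j, hj1, hj2, _⟩; omega
  · rw [PySem.List.pyRange_one_eq_nil (le_refl 1)]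
    simp
    omega

theorem out_step (n c_lib c_road : Int) (cities : List (List Int)) (hval : EdgesOk n cities)
    (m : Int) (hm1 : 1 ≤ m) (hm2 : m ≤ n) (st : List Bool × Int)
    (h : OutInv n c_lib c_road cities m st) :
    OutInv n c_lib c_road cities (m + 1)
      (pvBody (cities.foldl pvAdjStep PySem.Dict.empty) c_lib c_road st m) := by
  obtain ⟨hlen, hzero, hchr, htot⟩ := h
  have hadj : ∀ a b : Int,
      b ∈ (cities.foldl pvAdjStep PySem.Dict.empty).getD a [] ↔ ERel cities a b := by
    intro a b
    rw [adj_mem cities PySem.Dict.empty a b]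
    simp [PySem.Dict.getD_empty]
  have hmL : m < (st.1.length : Int) := by omega
  have hgm := pyGet?_getD_bool st.1 m (by omega) hmL
  rw [pvBody]
  by_cases hmark : st.1.getD m.toNat false = true
  · have hcond : ¬ (PySem.List.pyGet? st.1 m = some false) := by
      rw [hgm, hmark]; simp
    rw [if_neg hcond]
    have hbefore := (hchr m hm1 hm2).mp hmark
    have hpb : pvPb n cities m = false := by
      rcases Bool.eq_false_or_eq_true (pvPb n cities m) with hb | hb
      · exact absurd ((pvPb_iff n cities hval m hm1 hm2).mp hb)
          (not_cmin_of_before cities m hbefore)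
      · exact hb
    refine ⟨hlen, hzero, ?_, ?_⟩
    · intro x h1 h2
      rw [hchr x h1 h2]
      constructor
      · rintro ⟨j, hj1, hj2, hj3⟩; exact ⟨j, hj1, by omega, hj3⟩
      · rintro ⟨j, hj1, hj2, hj3⟩
        by_cases hjm : j < m
        · exact ⟨j, hj1, hjm, hj3⟩
        · have hjm' : j = m := by omega
          subst hjm'
          obtain ⟨j', hj1', hj2', hj3'⟩ := hbefore
          exact ⟨j', hj1', hj2', reach_trans hj3' hj3⟩
    · rw [htot, countP_succ (pvPb n cities) m hm1, hpb]
      simp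
  · have hmfalse : st.1.getD m.toNat false = false := by
      rcases Bool.eq_false_or_eq_true (st.1.getD m.toNat false) with hb | hb
      · exact absurd hb hmark
      · exact hb
    have hcond : PySem.List.pyGet? st.1 m = some false := by rw [hgm, hmfalse]
    rw [if_pos hcond]
    have hnb : ¬ ∃ j, 1 ≤ j ∧ j < m ∧ Reach cities j m :=
      fun hh => hmark ((hchr m hm1 hm2).mpr hh)
    have hpb : pvPb n cities m = true :=
      (pvPb_iff n cities hval m hm1 hm2).mpr
        (cmin_self_of_not_before n cities hval m hm1 hm2 hnb)
    have hclosed : ∀ x, MkP n st.1 x → ∀ y, ERel cities x y → MkP n st.1 y := by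
      intro x hx y hy
      obtain ⟨j, hj1, hj2, hj3⟩ := (hchr x hx.1 hx.2.1).mp hx.2.2
      have hyr := (erel_range hval hy).2
      exact ⟨hyr.1, hyr.2,
        (hchr y hyr.1 hyr.2).mpr ⟨j, hj1, hj2, Relation.ReflTransGen.tail hj3 hy⟩⟩
    obtain ⟨l1, l2, l3, l4⟩ := pvBfs_launch n m cities
      (cities.foldl pvAdjStep PySem.Dict.empty) hadj hval hm1 hm2 st.1 hlen hclosed hmfalse
    refine ⟨by rw [l3, hlen], by rw [l4, hzero], ?_, ?_⟩
    · intro x h1 h2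
      constructor
      · intro hx
        rcases (l1 x).mp ⟨h1, h2, hx⟩ with hmm | hmm
        · obtain ⟨j, hj1, hj2, hj3⟩ := (hchr x h1 h2).mp hmm.2.2
          exact ⟨j, hj1, by omega, hj3⟩
        · exact ⟨m, hm1, by omega, hmm.2.2⟩
      · rintro ⟨j, hj1, hj2, hj3⟩
        by_cases hjm : j < m
        · exact ((l1 x).mpr (Or.inl ⟨h1, h2,
            (hchr x h1 h2).mpr ⟨j, hj1, hjm, hj3⟩⟩)).2.2
        · have hjm' : j = m := by omega
          subst hjm'
          exact ((l1 x).mpr (Or.inr ⟨h1, h2, hj3⟩)).2.2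
    · rw [htot, countP_succ (pvPb n cities) m hm1, hpb]
      have hcf : ((pvBfs (cities.foldl pvAdjStep PySem.Dict.empty) [m]
          (PySem.List.pySetD st.1 m true) 1).1.count false : Int)
            = (st.1.count false : Int)
              - (pvBfs (cities.foldl pvAdjStep PySem.Dict.empty) [m]
                (PySem.List.pySetD st.1 m true) 1).2 := by omega
      rw [hcf]
      push_cast
      simp only [if_true]
      ring

theorem out_fold (n c_lib c_road : Int) (cities : List (List Int))
    (hval : EdgesOk n cities) (hn : 0 ≤ n) :
    ∀ k : Nat, (1 + (k : Int) ≤ n + 1) →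
      OutInv n c_lib c_road cities (1 + k)
        ((PySem.List.pyRange 1 (1 + (k : Int)) 1).foldl
          (pvBody (cities.foldl pvAdjStep PySem.Dict.empty) c_lib c_road)
          (List.replicate (n + 1).toNat false, 0)) := by
  intro k
  induction k with
  | zero =>
    intro _
    simp only [Nat.cast_zero, add_zero]
    rw [PySem.List.pyRange_one_eq_nil (le_refl 1)]
    simpa using out_base n c_lib c_road cities hn
  | succ k ihk =>
    intro hk
    have h1 : (1 : Int) + ((k + 1 : Nat) : Int) = (1 + (k : Int)) + 1 := by push_cast; ring
    rw [h1, PySem.List.pyRange_one_succ_right (by omega : (1 : Int) ≤ 1 + k),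
      List.foldl_append, List.foldl_cons, List.foldl_nil]
    exact out_step n c_lib c_road cities hval (1 + k) (by omega) (by omega) _
      (ihk (by push_cast at hk ⊢; omega))

theorem final_count (n : Int) (hn : 0 ≤ n) (vis : List Bool)
    (hlen : vis.length = (n + 1).toNat) (hzero : vis.getD 0 false = false)
    (hall : ∀ x : Int, 1 ≤ x → x ≤ n → vis.getD x.toNat false = true) :
    (vis.count false : Int) = 1 := by
  have hv : vis = false :: List.replicate n.toNat true := by
    apply List.ext_getElem
    · simp [hlen]; omega
    · intro i h1 h2
      rcases Nat.eq_zero_or_pos i with rfl | hi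
      · rw [List.getD_eq_getElem _ _ (by omega)] at hzero
        simpa using hzero
      · have hin : (i : Int) ≤ n := by omega
        have hx := hall (i : Int) (by omega) hin
        rw [show ((i : Int)).toNat = i from by omega,
          List.getD_eq_getElem _ _ h1] at hx
        rw [hx]
        rcases i with _ | j
        · omega
        · simp [List.getElem_replicate]
  rw [hv]
  simp [List.count_replicate]

theorem edgesOk_of_pre (n : Int) (cities : List (List Int))
    (hall : (cities.all (fun e =>
      match e with
      | [u, v] => decide (1 ≤ u ∧ u ≤ n ∧ 1 ≤ v ∧ v ≤ n)
      | _ => false)) = true) : EdgesOk n cities := by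
  intro e he
  have h := List.all_eq_true.mp hall e he
  match e with
  | [] => simp at h
  | [x] => simp at h
  | x :: y :: z :: t => simp at h
  | [u, v] =>
    simp only [decide_eq_true_eq] at h
    exact ⟨u, v, rfl, h.1, h.2.1, h.2.2.1, h.2.2.2⟩

-- ===== VERDICT (by name: the statement is the Claim_ definition above) =====
theorem roadsAndLibraries_spec : Claim_equal_roadsAndLibraries := by
  intro n c_lib c_road cities hdom hpre
  rw [Spec_roadsAndLibraries]
  by_cases hc : c_lib ≤ c_road
  · rw [roadsAndLibraries, roadsAndLibraries_alt, if_pos hc, if_pos hc]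
  · obtain ⟨hn, hallb⟩ := hpre.resolve_left hc
    have hval := edgesOk_of_pre n cities hallb
    have hfold := out_fold n c_lib c_road cities hval hn n.toNat (by omega)
    rw [show (1 : Int) + (n.toNat : Int) = n + 1 from by omega] at hfold
    obtain ⟨hlenF, hzeroF, hchrF, htotF⟩ := hfold
    have hcf := final_count n hn _ hlenF hzeroF
      (fun x h1 h2 => (hchrF x h1 h2).mpr ⟨x, h1, by omega, Relation.ReflTransGen.refl⟩)
    rw [roads_eq, if_neg hc, roadsAndLibraries_alt, if_neg hc, htotF, hcf]
    show _ = (((PySem.List.pyRange 1 (n + 1) 1).countP (pvPb n cities) : Int)) * c_lib +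
      (n - ((PySem.List.pyRange 1 (n + 1) 1).countP (pvPb n cities) : Int)) * c_road
    ring
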